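-- pv_equiv track=rewrite | github.com/anmaricdev/Thesis-Bachelor | Bin Packing Algorithms/BinPackingAlgorithms.py | bin_packing_best_fit_var_capa
-- ===== SOURCE A (Python) =====
-- def bin_packing_best_fit_var_capa(bin_capacities, elements):
--     is_packing_possible = True
--     max_capacity = max(bin_capacities)
--     m = len(bin_capacities)
--     n = len(elements)
--     bins = [[] for _ in range(m)]
--     bins_in_use = [i for i in range(m)]
--     bins_packed_after_failure = [[] for _ in range(m)]
--     for elem in elements:
--         # search for bin in use where it fits best
--         best_bin = -1
--         best_remaining_capacity = max_capacity + 1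
--         for i in range(len(bins_in_use)):
--             remaining_capacity = bin_capacities[bins_in_use[i]] - (sum(bins[bins_in_use[i]]) + elem)
--             if remaining_capacity >= 0 and \
--                 remaining_capacity < best_remaining_capacity:
--                 best_bin = bins_in_use[i]
--                 best_remaining_capacity = remaining_capacity
--         # found?
--         if best_bin != -1:
--             bins[best_bin] += [elem]
--             if not is_packing_possible:
--                 bins_packed_after_failure[best_bin] += [elem]
--             # is this bin full now?
--             if best_remaining_capacity == 0:
--                 bins_in_use.remove(best_bin)
--         else:
--             is_packing_possible = False
--     return is_packing_possible, bins, bins_packed_after_failure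
-- ===== SOURCE B (Python) =====
-- def _ceiling_pos(usable, elem):
--     # usable is sorted ascending by (available_space, bin_index);
--     # find the first position whose available space is >= elem
--     lo, hi = 0, len(usable)
--     while lo < hi:
--         mid = (lo + hi) // 2
--         if usable[mid][0] < elem:
--             lo = mid + 1
--         else:
--             hi = mid
--     return lo
--
-- def _insert_sorted(usable, entry):
--     # insert entry keeping usable sorted ascending
--     lo, hi = 0, len(usable)
--     while lo < hi:
--         mid = (lo + hi) // 2
--         if usable[mid] < entry:
--             lo = mid + 1
--         else:
--             hi = mid
--     usable.insert(lo, entry)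
--
-- def bin_packing_best_fit_var_capa(bin_capacities, elements):
--     is_packing_possible = True
--     bins = [[] for _ in bin_capacities]
--     bins_packed_after_failure = [[] for _ in bin_capacities]
--     # the still-usable bins, kept sorted by (available_space, bin_index)
--     usable = sorted((c, i) for i, c in enumerate(bin_capacities))
--     for elem in elements:
--         k = _ceiling_pos(usable, elem)
--         if k < len(usable):
--             avail, idx = usable.pop(k)
--             bins[idx].append(elem)
--             if not is_packing_possible:
--                 bins_packed_after_failure[idx].append(elem)
--             if avail > elem:
--                 _insert_sorted(usable, (avail - elem, idx))
--         else:
--             is_packing_possible = False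
--     return is_packing_possible, bins, bins_packed_after_failure
-- ===== Notes on version B (the rewrite author's own statement) =====
-- stated objective: alternative
-- what changed: B keeps the usable bins in a list sorted by (available_space, bin_index), picks each element's bin with a binary-search ceiling query (smallest available space >= elem, lowest index on ties) and re-inserts the shrunk bin by sorted insertion, instead of A's recomputing sum(bins[i]) and scanning all in-use bins for every element; Pre_ excludes empty bin_capacities (A's max() raises ValueError) and lists with a negative element, which are outside bin packing's natural domain and where A's acceptance rule is an artefact of its max_capacity+1 sentinel.
-- outside the precondition, e.g. on bin_packing_best_fit_var_capa([5], [-10]): A returns (False, [[]], [[]]), B returns (True, [[-10]], [[]])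
import Mathlib
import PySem

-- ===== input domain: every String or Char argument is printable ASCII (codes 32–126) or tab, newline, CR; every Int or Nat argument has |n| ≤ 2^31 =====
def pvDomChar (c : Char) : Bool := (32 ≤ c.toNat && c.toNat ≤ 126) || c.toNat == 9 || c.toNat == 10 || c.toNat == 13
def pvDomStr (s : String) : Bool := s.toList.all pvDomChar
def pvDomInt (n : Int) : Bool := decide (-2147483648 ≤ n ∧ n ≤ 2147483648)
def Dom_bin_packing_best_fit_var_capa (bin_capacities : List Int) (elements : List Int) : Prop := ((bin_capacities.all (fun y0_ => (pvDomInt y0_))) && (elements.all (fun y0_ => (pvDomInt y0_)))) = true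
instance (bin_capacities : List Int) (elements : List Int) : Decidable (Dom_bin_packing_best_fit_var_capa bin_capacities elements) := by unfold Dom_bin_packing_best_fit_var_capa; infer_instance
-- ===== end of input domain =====

-- B keeps the usable bins in a list sorted by (available_space, bin_index), picks each element's
-- bin by a binary-search ceiling query and re-inserts the shrunk bin by sorted insertion, instead
-- of A's per-element rescan of all in-use bins with recomputed loads (alternative data structure).

-- ===== PORT A =====
-- inner loop body of A: best-fit scan over the in-use bins, recomputing the bin's load
def pvBestFit (bin_capacities : List Int) (bins : List (List Int)) (elem : Int)
    (acc : Int × Int) (j : Int) : Int × Int :=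
  let rem := PySem.List.pyGetD bin_capacities j 0 - ((PySem.List.pyGetD bins j []).sum + elem)
  if 0 ≤ rem ∧ rem < acc.2 then (j, rem) else acc

-- one iteration of A's outer loop; state = (is_packing_possible, bins, bins_in_use, bins_packed_after_failure)
def pvAstep (bin_capacities : List Int) (max_capacity : Int)
    (st : Bool × List (List Int) × List Int × List (List Int)) (elem : Int) :
    Bool × List (List Int) × List Int × List (List Int) :=
  let ok := st.1
  let bins := st.2.1
  let use := st.2.2.1
  let after := st.2.2.2
  let best := (PySem.List.pyRange 0 (use.length : Int) 1).foldl
      (fun acc i => pvBestFit bin_capacities bins elem acc (PySem.List.pyGetD use i (-1)))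
      (-1, max_capacity + 1)
  if best.1 ≠ -1 then
    let bins' := PySem.List.pySetD bins best.1 (PySem.List.pyGetD bins best.1 [] ++ [elem])
    let after' := if ok then after else
      PySem.List.pySetD after best.1 (PySem.List.pyGetD after best.1 [] ++ [elem])
    let use' := if best.2 = 0 then (PySem.List.remove? use best.1).getD use else use
    (ok, bins', use', after')
  else
    (false, bins, use, after)

def bin_packing_best_fit_var_capa (bin_capacities : List Int) (elements : List Int) :
    Bool × List (List Int) × List (List Int) :=
  let max_capacity := (PySem.List.max? bin_capacities (fun x => x)).getD 0
  let m := bin_capacities.length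
  let bins : List (List Int) := List.replicate m []
  let bins_in_use := PySem.List.pyRange 0 (m : Int) 1
  let bins_packed_after_failure : List (List Int) := List.replicate m []
  let fin := elements.foldl (pvAstep bin_capacities max_capacity)
      (true, bins, bins_in_use, bins_packed_after_failure)
  (fin.1, fin.2.1, fin.2.2.2)

-- ===== PORT B =====
-- _ceiling_pos: hand-written binary search of Source B; the while-loop is ported step for step,
-- with fuel hi - lo (each iteration strictly shrinks hi - lo, so the fuel never runs out)
def pvCeilPosF (usable : List (Int × Int)) (elem : Int) : Nat → Nat → Nat → Nat
  | 0, lo, _ => lo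
  | fuel + 1, lo, hi =>
    if lo < hi then
      let mid := (lo + hi) / 2
      if (PySem.List.pyGetD usable (mid : Int) (0, 0)).1 < elem then
        pvCeilPosF usable elem fuel (mid + 1) hi
      else
        pvCeilPosF usable elem fuel lo mid
    else lo

def pvCeilPos (usable : List (Int × Int)) (elem : Int) (lo hi : Nat) : Nat :=
  pvCeilPosF usable elem (hi - lo) lo hi

-- Python's tuple comparison (a, b) < (c, d) on int pairs, used by _insert_sorted
def pvTupLt (p q : Int × Int) : Bool :=
  decide (p.1 < q.1) || (decide (p.1 = q.1) && decide (p.2 < q.2))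

-- _insert_sorted's position search (same while-loop shape as _ceiling_pos)
def pvInsPosF (usable : List (Int × Int)) (entry : Int × Int) : Nat → Nat → Nat → Nat
  | 0, lo, _ => lo
  | fuel + 1, lo, hi =>
    if lo < hi then
      let mid := (lo + hi) / 2
      if pvTupLt (PySem.List.pyGetD usable (mid : Int) (0, 0)) entry then
        pvInsPosF usable entry fuel (mid + 1) hi
      else
        pvInsPosF usable entry fuel lo mid
    else lo

def pvInsPos (usable : List (Int × Int)) (entry : Int × Int) (lo hi : Nat) : Nat :=
  pvInsPosF usable entry (hi - lo) lo hi

-- one iteration of B's loop; state = (is_packing_possible, bins, bins_packed_after_failure, usable)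
def pvBstep (st : Bool × List (List Int) × List (List Int) × List (Int × Int)) (elem : Int) :
    Bool × List (List Int) × List (List Int) × List (Int × Int) :=
  let ok := st.1
  let bins := st.2.1
  let after := st.2.2.1
  let usable := st.2.2.2
  let k := pvCeilPos usable elem 0 usable.length
  if k < usable.length then
    match PySem.List.pop? usable (k : Int) with
    | some (p, usable1) =>
      let avail := p.1
      let idx := p.2
      let bins' := PySem.List.pySetD bins idx (PySem.List.pyGetD bins idx [] ++ [elem])
      let after' := if ok then after else
        PySem.List.pySetD after idx (PySem.List.pyGetD after idx [] ++ [elem])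
      let usable' := if elem < avail then
          PySem.List.insert usable1 (pvInsPos usable1 (avail - elem, idx) 0 usable1.length : Int)
            (avail - elem, idx)
        else usable1
      (ok, bins', after', usable')
    | none => (ok, bins, after, usable)  -- unreachable: k < len(usable) makes pop succeed
  else (false, bins, after, usable)

def bin_packing_best_fit_var_capa_alt (bin_capacities : List Int) (elements : List Int) :
    Bool × List (List Int) × List (List Int) :=
  let bins : List (List Int) := bin_capacities.map (fun _ => [])
  let bins_packed_after_failure : List (List Int) := bin_capacities.map (fun _ => [])
  let usable := PySem.List.sorted2
      ((PySem.List.enumerate bin_capacities 0).map (fun p => (p.2, p.1)))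
      (fun p => p.1) (fun p => p.2) false
  let fin := elements.foldl pvBstep (true, bins, bins_packed_after_failure, usable)
  (fin.1, fin.2.1, fin.2.2.1)

-- ===== PRECONDITION & SPEC =====
-- Pre_ excludes empty bin_capacities, on which A raises ValueError in max(), and element lists
-- containing a negative element: negative sizes are outside bin packing's natural domain, and
-- there A's acceptance rule (remaining < max_capacity + 1) is an artefact of its sentinel.
def Pre_bin_packing_best_fit_var_capa (bin_capacities : List Int) (elements : List Int) : Prop :=
  bin_capacities ≠ [] ∧ ∀ e ∈ elements, 0 ≤ e
instance (bin_capacities : List Int) (elements : List Int) :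
    Decidable (Pre_bin_packing_best_fit_var_capa bin_capacities elements) := by
  unfold Pre_bin_packing_best_fit_var_capa; infer_instance

def pvWitness_bin_packing_best_fit_var_capa : List Int × List Int := ([5, 3], [2, 3, 1])


def Spec_bin_packing_best_fit_var_capa (bin_capacities : List Int) (elements : List Int)
    (out : Bool × List (List Int) × List (List Int)) : Prop :=
  out = bin_packing_best_fit_var_capa_alt bin_capacities elements
instance (bin_capacities : List Int) (elements : List Int)
    (out : Bool × List (List Int) × List (List Int)) :
    Decidable (Spec_bin_packing_best_fit_var_capa bin_capacities elements out) := by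
  unfold Spec_bin_packing_best_fit_var_capa; infer_instance

-- ===== CLAIM (what is proved, stated in full; the proofs are below) =====
def Claim_equal_bin_packing_best_fit_var_capa : Prop := ∀ (bin_capacities : List Int) (elements : List Int), Dom_bin_packing_best_fit_var_capa bin_capacities elements → Pre_bin_packing_best_fit_var_capa bin_capacities elements → Spec_bin_packing_best_fit_var_capa bin_capacities elements (bin_packing_best_fit_var_capa bin_capacities elements)


-- ===== LEMMAS AND PROOFS =====

-- strict lexicographic order on int pairs (Python's tuple <), as a Prop
def pvLex (p q : Int × Int) : Prop := p.1 < q.1 ∨ (p.1 = q.1 ∧ p.2 < q.2)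

theorem pvTupLt_iff (p q : Int × Int) : pvTupLt p q = true ↔ pvLex p q := by
  unfold pvTupLt pvLex
  simp only [Bool.or_eq_true, Bool.and_eq_true, decide_eq_true_eq]

-- the comparison sorted2 uses (identical relation to pvLex on the linear order Int)
def pvLtB (a b : Int × Int) : Bool :=
  decide (a.1 < b.1) || (!decide (b.1 < a.1) && decide (a.2 < b.2))

theorem pvLtB_iff (p q : Int × Int) : pvLtB p q = true ↔ pvLex p q := by
  unfold pvLtB pvLex
  simp only [Bool.or_eq_true, Bool.and_eq_true, Bool.not_eq_eq_eq_not, Bool.not_true,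
    decide_eq_true_eq, decide_eq_false_iff_not]
  omega

-- the remaining capacity A computes for bin j when trying to add elem
def pvR (bin_capacities : List Int) (bins : List (List Int)) (elem j : Int) : Int :=
  PySem.List.pyGetD bin_capacities j 0 - ((PySem.List.pyGetD bins j []).sum + elem)

-- the free space B tracks for bin j
def pvAvail (caps : List Int) (bins : List (List Int)) (j : Int) : Int :=
  PySem.List.pyGetD caps j 0 - (PySem.List.pyGetD bins j []).sum

theorem pvR_eq (caps : List Int) (bins : List (List Int)) (e j : Int) :
    pvR caps bins e j = pvAvail caps bins j - e := by
  unfold pvR pvAvail; ring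

-- A's inner loop is the scan fold over the in-use list
theorem pvBestFit_eq (caps : List Int) (bins : List (List Int)) (e : Int) :
    pvBestFit caps bins e
      = fun acc j => if 0 ≤ pvR caps bins e j ∧ pvR caps bins e j < acc.2
          then (j, pvR caps bins e j) else acc := by
  funext acc j
  rfl

-- A's scan loop: either nothing is eligible, or it returns a lex-least eligible (index, rem)
theorem pvScan_spec (r : Int → Int) (us : List Int) (h : us.Pairwise (· < ·)) (b0 v0 : Int) :
    (us.foldl (fun acc j => if 0 ≤ r j ∧ r j < acc.2 then (j, r j) else acc) (b0, v0) = (b0, v0)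
      ∧ ∀ k ∈ us, ¬ (0 ≤ r k ∧ r k < v0)) ∨
    (∃ jm, jm ∈ us ∧
      us.foldl (fun acc j => if 0 ≤ r j ∧ r j < acc.2 then (j, r j) else acc) (b0, v0) = (jm, r jm)
      ∧ 0 ≤ r jm ∧ r jm < v0
      ∧ ∀ k ∈ us, (0 ≤ r k ∧ r k < v0) → ¬ pvLex (r k, k) (r jm, jm)) := by
  induction us generalizing b0 v0 with
  | nil => exact Or.inl ⟨rfl, by simp⟩
  | cons j us ih =>
    rw [List.pairwise_cons] at h
    obtain ⟨hj, hus⟩ := h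
    simp only [List.foldl_cons]
    by_cases hp : 0 ≤ r j ∧ r j < v0
    · rw [if_pos hp]
      rcases ih hus j (r j) with ⟨heq, hall⟩ | ⟨jm, hmem, heq, h0, hlt, hall⟩
      · refine Or.inr ⟨j, by simp, heq, hp.1, hp.2, ?_⟩
        intro k hk hke
        rcases List.mem_cons.mp hk with rfl | hk
        · unfold pvLex; omega
        · have := hall k hk
          have := hj k hk
          unfold pvLex; omega
      · refine Or.inr ⟨jm, List.mem_cons_of_mem _ hmem, heq, h0, by omega, ?_⟩
        intro k hk hke
        rcases List.mem_cons.mp hk with rfl | hk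
        · unfold pvLex; omega
        · by_cases hkj : r k < r j
          · exact hall k hk ⟨hke.1, hkj⟩
          · unfold pvLex; omega
    · rw [if_neg hp]
      rcases ih hus b0 v0 with ⟨heq, hall⟩ | ⟨jm, hmem, heq, h0, hlt, hall⟩
      · refine Or.inl ⟨heq, ?_⟩
        intro k hk
        rcases List.mem_cons.mp hk with rfl | hk
        · exact hp
        · exact hall k hk
      · refine Or.inr ⟨jm, List.mem_cons_of_mem _ hmem, heq, h0, hlt, ?_⟩
        intro k hk hke
        rcases List.mem_cons.mp hk with rfl | hk
        · exact absurd hke hp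
        · exact hall k hk hke

theorem pvGetD_replicate (m : Nat) (j : Int) :
    PySem.List.pyGetD (List.replicate m ([] : List Int)) j [] = [] := by
  cases h : PySem.List.pyGet? (List.replicate m ([] : List Int)) j with
  | none => simp [PySem.List.pyGetD, h]
  | some x =>
    have := PySem.List.mem_of_pyGet?_eq_some _ h
    have hx := List.eq_of_mem_replicate this
    simp [PySem.List.pyGetD, h, hx]

-- first components are monotone along a pvLex-sorted list
theorem pvKeyMono (usable : List (Int × Int)) (hpw : usable.Pairwise pvLex)
    (i j : Nat) (hij : i < j) (hj : j < usable.length) :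
    (usable[i]'(by omega)).1 ≤ (usable[j]).1 := by
  have := (List.pairwise_iff_getElem.mp hpw) i j (by omega) hj hij
  unfold pvLex at this
  omega

-- the binary search of _ceiling_pos finds the first position with free space ≥ elem
theorem pvCeilPosF_spec (usable : List (Int × Int)) (elem : Int)
    (hpw : usable.Pairwise pvLex) :
    ∀ (fuel lo hi : Nat), hi ≤ usable.length → lo ≤ hi → hi - lo ≤ fuel →
    lo ≤ pvCeilPosF usable elem fuel lo hi ∧ pvCeilPosF usable elem fuel lo hi ≤ hi ∧
    (∀ j (hj : j < usable.length), lo ≤ j → j < pvCeilPosF usable elem fuel lo hi →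
      (usable[j]).1 < elem) ∧
    (∀ j (hj : j < usable.length), pvCeilPosF usable elem fuel lo hi ≤ j → j < hi →
      elem ≤ (usable[j]).1) := by
  intro fuel
  induction fuel with
  | zero =>
    intro lo hi _ hlh hf
    have : lo = hi := by omega
    subst this
    simp only [pvCeilPosF]
    exact ⟨le_refl _, le_refl _, by omega, by omega⟩
  | succ fuel ih =>
    intro lo hi hhi hlh hf
    show _ ∧ _
    rw [pvCeilPosF]
    by_cases hlt : lo < hi
    · rw [if_pos hlt]
      have hmid1 : lo ≤ (lo + hi) / 2 := by omega
      have hmid2 : (lo + hi) / 2 < hi := by omega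
      have hmlen : (lo + hi) / 2 < usable.length := by omega
      have hget : PySem.List.pyGetD usable (((lo + hi) / 2 : Nat) : Int) (0, 0)
          = usable[(lo + hi) / 2] := by
        rw [PySem.List.pyGetD_natCast, List.getD_eq_getElem _ _ hmlen]
      simp only [hget]
      by_cases hb : (usable[(lo + hi) / 2]).1 < elem
      · rw [if_pos hb]
        obtain ⟨h1, h2, h3, h4⟩ := ih ((lo + hi) / 2 + 1) hi hhi (by omega) (by omega)
        refine ⟨by omega, h2, ?_, ?_⟩
        · intro j hj hlo hjr
          by_cases hjm : j ≤ (lo + hi) / 2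
          · rcases Nat.lt_or_ge j ((lo + hi) / 2) with hc | hc
            · have := pvKeyMono usable hpw j ((lo + hi) / 2) hc hmlen
              omega
            · have : j = (lo + hi) / 2 := by omega
              subst this; exact hb
          · exact h3 j hj (by omega) hjr
        · intro j hj hrj hjh
          exact h4 j hj hrj hjh
      · rw [if_neg hb]
        obtain ⟨h1, h2, h3, h4⟩ := ih lo ((lo + hi) / 2) (by omega) (by omega) (by omega)
        refine ⟨h1, by omega, ?_, ?_⟩
        · intro j hj hlo hjr
          exact h3 j hj hlo hjr
        · intro j hj hrj hjh
          by_cases hjm : j < (lo + hi) / 2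
          · exact h4 j hj hrj hjm
          · rcases Nat.lt_or_ge ((lo + hi) / 2) j with hc | hc
            · have := pvKeyMono usable hpw ((lo + hi) / 2) j hc hj
              omega
            · have : j = (lo + hi) / 2 := by omega
              subst this
              omega
    · rw [if_neg hlt]
      have : lo = hi := by omega
      subst this
      exact ⟨le_refl _, le_refl _, by omega, by omega⟩

theorem pvCeilPos_spec (usable : List (Int × Int)) (elem : Int)
    (hpw : usable.Pairwise pvLex) :
    pvCeilPos usable elem 0 usable.length ≤ usable.length ∧
    (∀ j (hj : j < usable.length), j < pvCeilPos usable elem 0 usable.length →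
      (usable[j]).1 < elem) ∧
    (∀ j (hj : j < usable.length), pvCeilPos usable elem 0 usable.length ≤ j →
      elem ≤ (usable[j]).1) := by
  obtain ⟨h1, h2, h3, h4⟩ :=
    pvCeilPosF_spec usable elem hpw (usable.length - 0) 0 usable.length (le_refl _)
      (by omega) (by omega)
  exact ⟨h2, fun j hj hjr => h3 j hj (by omega) hjr, fun j hj hrj => h4 j hj hrj hj⟩

-- the binary search of _insert_sorted finds the first position not lex-below entry
theorem pvInsPosF_spec (usable : List (Int × Int)) (entry : Int × Int)
    (hpw : usable.Pairwise pvLex) :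
    ∀ (fuel lo hi : Nat), hi ≤ usable.length → lo ≤ hi → hi - lo ≤ fuel →
    lo ≤ pvInsPosF usable entry fuel lo hi ∧ pvInsPosF usable entry fuel lo hi ≤ hi ∧
    (∀ j (hj : j < usable.length), lo ≤ j → j < pvInsPosF usable entry fuel lo hi →
      pvLex (usable[j]) entry) ∧
    (∀ j (hj : j < usable.length), pvInsPosF usable entry fuel lo hi ≤ j → j < hi →
      ¬ pvLex (usable[j]) entry) := by
  intro fuel
  induction fuel with
  | zero =>
    intro lo hi _ hlh hf
    have : lo = hi := by omega
    subst this
    simp only [pvInsPosF]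
    exact ⟨le_refl _, le_refl _, by omega, by omega⟩
  | succ fuel ih =>
    intro lo hi hhi hlh hf
    show _ ∧ _
    rw [pvInsPosF]
    by_cases hlt : lo < hi
    · rw [if_pos hlt]
      have hmid1 : lo ≤ (lo + hi) / 2 := by omega
      have hmid2 : (lo + hi) / 2 < hi := by omega
      have hmlen : (lo + hi) / 2 < usable.length := by omega
      have hget : PySem.List.pyGetD usable (((lo + hi) / 2 : Nat) : Int) (0, 0)
          = usable[(lo + hi) / 2] := by
        rw [PySem.List.pyGetD_natCast, List.getD_eq_getElem _ _ hmlen]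
      simp only [hget]
      by_cases hb : pvTupLt (usable[(lo + hi) / 2]) entry = true
      · rw [if_pos hb]
        rw [pvTupLt_iff] at hb
        obtain ⟨h1, h2, h3, h4⟩ := ih ((lo + hi) / 2 + 1) hi hhi (by omega) (by omega)
        refine ⟨by omega, h2, ?_, fun j hj hrj hjh => h4 j hj hrj hjh⟩
        intro j hj hlo hjr
        by_cases hjm : j ≤ (lo + hi) / 2
        · rcases Nat.lt_or_ge j ((lo + hi) / 2) with hc | hc
          · have := (List.pairwise_iff_getElem.mp hpw) j ((lo + hi) / 2) (by omega) hmlen hc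
            unfold pvLex at *
            omega
          · have : j = (lo + hi) / 2 := by omega
            subst this; exact hb
        · exact h3 j hj (by omega) hjr
      · rw [if_neg hb]
        rw [pvTupLt_iff] at hb
        obtain ⟨h1, h2, h3, h4⟩ := ih lo ((lo + hi) / 2) (by omega) (by omega) (by omega)
        refine ⟨h1, by omega, fun j hj hlo hjr => h3 j hj hlo hjr, ?_⟩
        intro j hj hrj hjh
        by_cases hjm : j < (lo + hi) / 2
        · exact h4 j hj hrj hjm
        · rcases Nat.lt_or_ge ((lo + hi) / 2) j with hc | hc
          · have := (List.pairwise_iff_getElem.mp hpw) ((lo + hi) / 2) j hmlen hj hc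
            unfold pvLex at *
            omega
          · have : j = (lo + hi) / 2 := by omega
            subst this
            exact hb
    · rw [if_neg hlt]
      have : lo = hi := by omega
      subst this
      exact ⟨le_refl _, le_refl _, by omega, by omega⟩

theorem pvInsPos_spec (usable : List (Int × Int)) (entry : Int × Int)
    (hpw : usable.Pairwise pvLex) :
    pvInsPos usable entry 0 usable.length ≤ usable.length ∧
    (∀ j (hj : j < usable.length), j < pvInsPos usable entry 0 usable.length →
      pvLex (usable[j]) entry) ∧
    (∀ j (hj : j < usable.length), pvInsPos usable entry 0 usable.length ≤ j →
      ¬ pvLex (usable[j]) entry) := by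
  obtain ⟨h1, h2, h3, h4⟩ :=
    pvInsPosF_spec usable entry hpw (usable.length - 0) 0 usable.length (le_refl _)
      (by omega) (by omega)
  exact ⟨h2, fun j hj hjr => h3 j hj (by omega) hjr, fun j hj hrj => h4 j hj hrj hj⟩

theorem pvLex_trans {p q r : Int × Int} (h1 : pvLex p q) (h2 : pvLex q r) : pvLex p r := by
  unfold pvLex at *; omega

theorem pvInsertBy_perm (x : Int × Int) (l : List (Int × Int)) :
    (PySem.List.insertBy pvLtB x l).Perm (x :: l) := by
  induction l with
  | nil => exact List.Perm.refl _
  | cons y ys ih =>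
    show (if pvLtB x y = true then x :: y :: ys else y :: PySem.List.insertBy pvLtB x ys).Perm _
    by_cases hb : pvLtB x y = true
    · rw [if_pos hb]
    · rw [if_neg hb]
      exact (ih.cons y).trans (List.Perm.swap x y ys)

theorem pvInsertBy_pairwise (x : Int × Int) (l : List (Int × Int))
    (hpw : l.Pairwise pvLex) (hsnd : ∀ y ∈ l, y.2 ≠ x.2) :
    (PySem.List.insertBy pvLtB x l).Pairwise pvLex := by
  induction l with
  | nil => simp [PySem.List.insertBy]
  | cons y ys ih =>
    rw [List.pairwise_cons] at hpw
    obtain ⟨hy, hys⟩ := hpw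
    show (if pvLtB x y = true then x :: y :: ys else y :: PySem.List.insertBy pvLtB x ys).Pairwise _
    by_cases hb : pvLtB x y = true
    · rw [if_pos hb]
      rw [pvLtB_iff] at hb
      refine List.pairwise_cons.mpr ⟨?_, List.pairwise_cons.mpr ⟨hy, hys⟩⟩
      intro z hz
      rcases List.mem_cons.mp hz with rfl | hz
      · exact hb
      · exact pvLex_trans hb (hy z hz)
    · rw [if_neg hb]
      refine List.pairwise_cons.mpr ⟨?_, ih hys (fun z hz => hsnd z (List.mem_cons_of_mem _ hz))⟩
      intro z hz
      have hz' := ((pvInsertBy_perm x ys).mem_iff).mp hz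
      rcases List.mem_cons.mp hz' with rfl | hz'
      · have hne := hsnd y List.mem_cons_self
        rw [pvLtB_iff] at hb
        unfold pvLex at *
        omega
      · exact hy z hz'

theorem pvFoldInsert_pairwise (xs : List (Int × Int)) :
    ∀ acc : List (Int × Int), acc.Pairwise pvLex →
    (∀ y ∈ acc, ∀ x ∈ xs, y.2 ≠ x.2) → ((xs.map (fun p => p.2)).Nodup) →
    (xs.foldl (fun acc x => PySem.List.insertBy pvLtB x acc) acc).Pairwise pvLex := by
  induction xs with
  | nil => intro acc h _ _; exact h
  | cons x xs ih =>
    intro acc hacc hcross hnd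
    simp only [List.map_cons, List.nodup_cons] at hnd
    simp only [List.foldl_cons]
    refine ih _ (pvInsertBy_pairwise x acc hacc
      (fun y hy => hcross y hy x List.mem_cons_self)) ?_ hnd.2
    intro y hy x' hx'
    rcases List.mem_cons.mp ((pvInsertBy_perm x acc).mem_iff.mp hy) with rfl | hy'
    · intro hc
      exact hnd.1 (hc ▸ List.mem_map.mpr ⟨x', hx', rfl⟩)
    · exact hcross y hy' x' (List.mem_cons_of_mem _ hx')

-- sorted2 with fst/snd keys is the insertBy fold with the pvLtB comparison
theorem pvSorted2_eq (L : List (Int × Int)) :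
    PySem.List.sorted2 L (fun p => p.1) (fun p => p.2) false
      = L.foldl (fun acc x => PySem.List.insertBy pvLtB x acc) [] := rfl

theorem pvSorted2_pairwise (L : List (Int × Int)) (hnd : (L.map (fun p => p.2)).Nodup) :
    (PySem.List.sorted2 L (fun p => p.1) (fun p => p.2) false).Pairwise pvLex := by
  rw [pvSorted2_eq]
  exact pvFoldInsert_pairwise L [] (by simp) (by simp) hnd

-- inserting at _insert_sorted's position keeps the list pvLex-sorted
theorem pvInsert_pairwise (l : List (Int × Int)) (entry : Int × Int)
    (hpw : l.Pairwise pvLex) (hsnd : ∀ y ∈ l, y.2 ≠ entry.2) :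
    (List.take (pvInsPos l entry 0 l.length) l ++
      entry :: List.drop (pvInsPos l entry 0 l.length) l).Pairwise pvLex := by
  obtain ⟨hle, hbefore, hafter⟩ := pvInsPos_spec l entry hpw
  set p := pvInsPos l entry 0 l.length with hp
  have hpairget := List.pairwise_iff_getElem.mp hpw
  rw [List.pairwise_append]
  refine ⟨hpw.sublist (List.take_sublist _ _), ?_, ?_⟩
  · rw [List.pairwise_cons]
    refine ⟨?_, hpw.sublist (List.drop_sublist _ _)⟩
    intro y hy
    rw [List.mem_drop_iff_getElem] at hy
    obtain ⟨j, hj, rfl⟩ := hy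
    have hnl := hafter (p + j) (by omega) (by omega)
    have hne := hsnd (l[p + j]'(by omega)) (List.getElem_mem _)
    unfold pvLex at *
    omega
  · intro x hx y hy
    rw [List.mem_take_iff_getElem] at hx
    obtain ⟨i, hi, rfl⟩ := hx
    have hilen : i < l.length := by omega
    have hip : i < p := by omega
    rcases List.mem_cons.mp hy with rfl | hy
    · exact hbefore i hilen hip
    · rw [List.mem_drop_iff_getElem] at hy
      obtain ⟨j, hj, rfl⟩ := hy
      exact hpairget i (p + j) hilen (by omega) (by omega)

-- the invariant tying A's state to B's state
def pvRel (caps : List Int) (maxc : Int)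
    (sA : Bool × List (List Int) × List Int × List (List Int))
    (sB : Bool × List (List Int) × List (List Int) × List (Int × Int)) : Prop :=
  sB.1 = sA.1 ∧ sB.2.1 = sA.2.1 ∧ sB.2.2.1 = sA.2.2.2 ∧
  sB.2.2.2.Pairwise pvLex ∧
  sB.2.2.2.Perm (sA.2.2.1.map (fun j => (pvAvail caps sA.2.1 j, j))) ∧
  sA.2.2.1.Pairwise (· < ·) ∧
  (∀ j ∈ sA.2.2.1, 0 ≤ j ∧ j < (sA.2.1.length : Int)) ∧
  (∀ j ∈ sA.2.2.1, pvAvail caps sA.2.1 j ≤ maxc)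

-- one loop iteration preserves the invariant
theorem pvStep_rel (caps : List Int) (maxc e : Int) (he : 0 ≤ e)
    (sA : Bool × List (List Int) × List Int × List (List Int))
    (sB : Bool × List (List Int) × List (List Int) × List (Int × Int))
    (h : pvRel caps maxc sA sB) :
    pvRel caps maxc (pvAstep caps maxc sA e) (pvBstep sB e) := by
  obtain ⟨okA, binsA, use, afterA⟩ := sA
  obtain ⟨ok, bins, after, usable⟩ := sB
  obtain ⟨hok, hbins, hafter, hpwU, hperm, hpwUse, hbd, hmax⟩ := h
  simp only at hok hbins hafter hpwU hperm hpwUse hbd hmax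
  subst hok hbins hafter
  have hfoldA : (PySem.List.pyRange 0 (use.length : Int) 1).foldl
      (fun acc i => pvBestFit caps bins e acc (PySem.List.pyGetD use i (-1)))
      (-1, maxc + 1)
      = use.foldl (pvBestFit caps bins e) (-1, maxc + 1) :=
    PySem.List.foldl_pyRange_zero_pyGetD' use (-1) (pvBestFit caps bins e) (-1, maxc + 1)
  set r := pvR caps bins e with hr
  set f := fun j : Int => (pvAvail caps bins j, j) with hf
  obtain ⟨hkle, hbelow, habove⟩ := pvCeilPos_spec usable e hpwU
  set k := pvCeilPos usable e 0 usable.length with hk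
  have hscanA := pvScan_spec r use hpwUse (-1) (maxc + 1)
  rw [← pvBestFit_eq caps bins e] at hscanA
  by_cases hklen : k < usable.length
  · -- an eligible bin exists; both sides pick the lex-least (free space, index)
    have hgmem : usable[k] ∈ usable := List.getElem_mem _
    have hkS : usable[k] ∈ use.map f := hperm.mem_iff.mp hgmem
    obtain ⟨i0, hi0use, hi0⟩ := List.mem_map.mp hkS
    have hi0a : pvAvail caps bins i0 = (usable[k]).1 := by rw [← hi0]
    have hi0i : i0 = (usable[k]).2 := by rw [← hi0]
    have helem : e ≤ (usable[k]).1 := habove k hklen (le_refl _)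
    have hi0el : 0 ≤ r i0 ∧ r i0 < maxc + 1 := by
      rw [hr, pvR_eq]
      have := hmax i0 hi0use
      omega
    rcases hscanA with ⟨_, hnone⟩ | ⟨jm, hjmuse, heq, h0, hlt, hall⟩
    · exact absurd hi0el (hnone i0 hi0use)
    -- the two selections coincide
    have hkmin : ∀ p ∈ usable, e ≤ p.1 → ¬ pvLex p (usable[k]) := by
      intro p hp hpe hlex
      obtain ⟨j, hj, rfl⟩ := List.mem_iff_getElem.mp hp
      rcases Nat.lt_trichotomy j k with hc | hc | hc
      · have := hbelow j hj hc
        omega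
      · subst hc
        unfold pvLex at hlex
        omega
      · have := (List.pairwise_iff_getElem.mp hpwU) k j hklen hj hc
        unfold pvLex at *
        omega
    have hjmavail : e ≤ pvAvail caps bins jm := by
      rw [hr, pvR_eq] at h0
      omega
    have h1 : ¬ pvLex (f jm) (usable[k]) :=
      hkmin (f jm) (hperm.mem_iff.mpr (List.mem_map.mpr ⟨jm, hjmuse, rfl⟩)) hjmavail
    have h2 : ¬ pvLex (usable[k]) (f jm) := by
      intro hlex
      apply hall i0 hi0use hi0el
      rw [hr, pvR_eq, pvR_eq]
      simp only [hf] at hlex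
      unfold pvLex at *
      simp only at hlex ⊢
      omega
    have hEq : f jm = usable[k] := by
      simp only [hf] at h1 h2 ⊢
      unfold pvLex at h1 h2
      simp only at h1 h2
      have ha : pvAvail caps bins jm = (usable[k]).1 := by omega
      have hb : jm = (usable[k]).2 := by omega
      rw [ha, hb]
    have hjmk : jm = (usable[k]).2 := by rw [← hEq]
    have hjmavail' : pvAvail caps bins jm = (usable[k]).1 := by rw [← hEq]
    obtain ⟨hjm0, hjmlen⟩ := hbd jm hjmuse
    -- A takes its then-branch with best = (jm, r jm)
    have hA : pvAstep caps maxc (ok, bins, use, after) e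
        = (ok,
           PySem.List.pySetD bins jm (PySem.List.pyGetD bins jm [] ++ [e]),
           (if r jm = 0 then (PySem.List.remove? use jm).getD use else use),
           (if ok then after else
             PySem.List.pySetD after jm (PySem.List.pyGetD after jm [] ++ [e]))) := by
      simp only [pvAstep, hfoldA, heq]
      rw [if_pos (show (jm : Int) ≠ -1 by omega)]
    -- B pops position k
    have hpop : PySem.List.pop? usable (k : Int) = some (usable[k], usable.eraseIdx k) :=
      PySem.List.pop?_natCast usable k hklen
    have hB : pvBstep (ok, bins, after, usable) e
        = (ok,
           PySem.List.pySetD bins (usable[k]).2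
             (PySem.List.pyGetD bins (usable[k]).2 [] ++ [e]),
           (if ok then after else
             PySem.List.pySetD after (usable[k]).2
               (PySem.List.pyGetD after (usable[k]).2 [] ++ [e])),
           (if e < (usable[k]).1 then
              PySem.List.insert (usable.eraseIdx k)
                (pvInsPos (usable.eraseIdx k) ((usable[k]).1 - e, (usable[k]).2) 0
                  (usable.eraseIdx k).length : Int)
                ((usable[k]).1 - e, (usable[k]).2)
            else usable.eraseIdx k)) := by
      simp only [pvBstep, ← hk]
      rw [if_pos hklen, hpop]
    rw [hA, hB, ← hjmk]
    -- updated bins and the new free-space function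
    set bins' := PySem.List.pySetD bins jm (PySem.List.pyGetD bins jm [] ++ [e]) with hbins'
    have hbins'set : bins' = bins.set jm.toNat (PySem.List.pyGetD bins jm [] ++ [e]) := by
      rw [hbins']
      exact PySem.List.pySetD_of_nonneg bins _ hjm0
    have hlen' : (bins'.length : Int) = (bins.length : Int) := by
      rw [hbins'set]; simp
    have hget' : ∀ j ∈ use, PySem.List.pyGetD bins' j []
        = if j = jm then PySem.List.pyGetD bins jm [] ++ [e] else PySem.List.pyGetD bins j [] := by
      intro j hj
      obtain ⟨hj0, hjlen⟩ := hbd j hj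
      rw [hbins'set]
      rw [PySem.List.pyGetD_eq_getElem _ _ hj0 (by simpa using hjlen)]
      rw [List.getElem_set]
      by_cases hjk : j = jm
      · rw [if_pos hjk]
        rw [if_pos (by omega)]
      · rw [if_neg hjk]
        rw [if_neg (by omega)]
        rw [PySem.List.pyGetD_eq_getElem _ _ hj0 (by simpa using hjlen)]
    have hnewk : pvAvail caps bins' jm = pvAvail caps bins jm - e := by
      unfold pvAvail
      rw [hget' jm hjmuse, if_pos rfl]
      simp only [List.sum_append, List.sum_cons, List.sum_nil]
      ring
    have hnewne : ∀ j ∈ use, j ≠ jm → pvAvail caps bins' j = pvAvail caps bins j := by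
      intro j hj hjne
      unfold pvAvail
      rw [hget' j hj, if_neg hjne]
    set f' := fun j : Int => (pvAvail caps bins' j, j) with hf'
    have hndUse : use.Nodup := hpwUse.nodup
    -- the popped list is in bijection with use minus jm
    have hperm1 : (usable.eraseIdx k).Perm ((use.erase jm).map f) := by
      have hc1 : (usable[k] :: usable.eraseIdx k).Perm usable :=
        List.getElem_cons_eraseIdx_perm hklen
      have hc2 : use.Perm (jm :: use.erase jm) := List.perm_cons_erase hjmuse
      have : (usable[k] :: usable.eraseIdx k).Perm (usable[k] :: (use.erase jm).map f) := by
        refine (hc1.trans hperm).trans ?_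
        have := hc2.map f
        simp only [List.map_cons] at this
        rw [hEq] at this
        exact this
      exact this.cons_inv
    have hmapne : (use.erase jm).map f = (use.erase jm).map f' := by
      apply List.map_congr_left
      intro j hj
      have hjne : j ≠ jm := (hndUse.mem_erase_iff.mp hj).1
      have hjuse : j ∈ use := List.mem_of_mem_erase hj
      simp only [hf, hf', hnewne j hjuse hjne]
    have hsnd1 : ∀ y ∈ usable.eraseIdx k, y.2 ≠ jm := by
      intro y hy
      have := hperm1.mem_iff.mp hy
      obtain ⟨j, hj, rfl⟩ := List.mem_map.mp this
      simp only [hf]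
      exact (hndUse.mem_erase_iff.mp hj).1
    have hpw1 : (usable.eraseIdx k).Pairwise pvLex :=
      hpwU.sublist (List.eraseIdx_sublist usable k)
    by_cases hrz : r jm = 0
    · -- the chosen bin is now full: dropped on both sides
      have havz : (usable[k]).1 = e := by
        rw [hr, pvR_eq] at hrz
        omega
      have hnotlt : ¬ e < (usable[k]).1 := by omega
      rw [if_pos hrz, if_neg hnotlt]
      rw [PySem.List.remove?_eq_some_erase use jm hjmuse]
      refine ⟨rfl, rfl, rfl, hpw1, ?_, hpwUse.sublist (List.erase_sublist ..), ?_, ?_⟩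
      · simp only [Option.getD_some]
        exact hperm1.trans (by rw [hmapne])
      · simp only [Option.getD_some]
        intro j hj
        have := hbd j (List.mem_of_mem_erase hj)
        omega
      · simp only [Option.getD_some]
        intro j hj
        rw [hnewne j (List.mem_of_mem_erase hj) (hndUse.mem_erase_iff.mp hj).1]
        exact hmax j (List.mem_of_mem_erase hj)
    · -- the chosen bin stays usable with shrunk free space
      have have' : e < (usable[k]).1 := by
        rw [hr, pvR_eq] at hrz h0
        omega
      rw [if_neg hrz, if_pos have']
      set entry : Int × Int := ((usable[k]).1 - e, jm) with hentry
      obtain ⟨hple, _, _⟩ := pvInsPos_spec (usable.eraseIdx k) entry hpw1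
      set p := pvInsPos (usable.eraseIdx k) entry 0 (usable.eraseIdx k).length with hp
      have hins : PySem.List.insert (usable.eraseIdx k) (p : Int) entry
          = List.take p (usable.eraseIdx k) ++ entry :: List.drop p (usable.eraseIdx k) :=
        PySem.List.insert_natCast _ p entry hple
      rw [hins]
      refine ⟨rfl, rfl, rfl, pvInsert_pairwise _ entry hpw1 ?_, ?_, hpwUse, ?_, ?_⟩
      · intro y hy
        exact hsnd1 y hy
      · -- permutation with the updated free-space map
        have hstep1 : (List.take p (usable.eraseIdx k) ++
            entry :: List.drop p (usable.eraseIdx k)).Perm (entry :: usable.eraseIdx k) := by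
          refine (List.perm_middle).trans ?_
          rw [List.take_append_drop]
        have hstep2 : (entry :: usable.eraseIdx k).Perm (entry :: (use.erase jm).map f') :=
          (hperm1.trans (by rw [hmapne])).cons entry
        have hstep3 : (use.map f').Perm (entry :: (use.erase jm).map f') := by
          have hc2 := (List.perm_cons_erase hjmuse).map f'
          simp only [List.map_cons] at hc2
          have : f' jm = entry := by
            simp only [hf', hentry, hnewk, hjmavail']
          rw [this] at hc2
          exact hc2
        exact (hstep1.trans hstep2).trans hstep3.symm
      · intro j hj
        have := hbd j hj
        refine ⟨this.1, ?_⟩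
        show j < (bins'.length : Int)
        omega
      · intro j hj
        by_cases hjne : j = jm
        · subst hjne
          rw [hnewk]
          have := hmax j hj
          omega
        · rw [hnewne j hj hjne]
          exact hmax j hj
  · -- no usable bin fits: both sides record the failure and change nothing else
    have hklen' : k = usable.length := by omega
    have hnoelig : ∀ j ∈ use, ¬ (0 ≤ r j ∧ r j < maxc + 1) := by
      intro j hj hel
      have hmem : f j ∈ usable := hperm.mem_iff.mpr (List.mem_map.mpr ⟨j, hj, rfl⟩)
      obtain ⟨n, hn, hfn⟩ := List.mem_iff_getElem.mp hmem
      have := hbelow n hn (by omega)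
      rw [hfn] at this
      rw [hr, pvR_eq] at hel
      simp only [hf] at this
      omega
    rcases hscanA with ⟨heq, _⟩ | ⟨jm, hjmuse, _, h0, hlt, _⟩
    · have hA : pvAstep caps maxc (ok, bins, use, after) e = (false, bins, use, after) := by
        simp only [pvAstep, hfoldA, heq]
        rw [if_neg (by simp)]
      have hB : pvBstep (ok, bins, after, usable) e = (false, bins, after, usable) := by
        simp only [pvBstep, ← hk]
        rw [if_neg hklen]
      rw [hA, hB]
      exact ⟨rfl, rfl, rfl, hpwU, hperm, hpwUse, hbd, hmax⟩
    · exact absurd ⟨h0, hlt⟩ (hnoelig jm hjmuse)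

-- the invariant holds initially
theorem pvInit_rel (caps : List Int) (hne : caps ≠ []) :
    pvRel caps ((PySem.List.max? caps (fun x => x)).getD 0)
      (true, List.replicate caps.length [], PySem.List.pyRange 0 (caps.length : Int) 1,
        List.replicate caps.length [])
      (true, caps.map (fun _ => []), caps.map (fun _ => []),
        PySem.List.sorted2 ((PySem.List.enumerate caps 0).map (fun p => (p.2, p.1)))
          (fun p => p.1) (fun p => p.2) false) := by
  have hmapconst : caps.map (fun _ => ([] : List Int)) = List.replicate caps.length [] := by
    simp [List.map_const']
  set L := (PySem.List.enumerate caps 0).map (fun p => (p.2, p.1)) with hLdef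
  have hL : L = (PySem.List.pyRange 0 (caps.length : Int) 1).map
      (fun j => (pvAvail caps (List.replicate caps.length []) j, j)) := by
    rw [hLdef, PySem.List.enumerate_eq_map_pyRange caps 0, List.map_map]
    apply List.map_congr_left
    intro j _
    simp only [Function.comp]
    unfold pvAvail
    rw [pvGetD_replicate]
    simp
  have hnd : (L.map (fun p => p.2)).Nodup := by
    rw [hLdef, List.map_map]
    have : ((fun p : Int × Int => p.2) ∘ (fun p : Int × Int => (p.2, p.1)))
        = (fun p : Int × Int => p.1) := rfl
    rw [this, PySem.List.map_fst_enumerate]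
    simpa using PySem.List.nodup_pyRange_one 0 (0 + (caps.length : Int))
  refine ⟨rfl, hmapconst, hmapconst, pvSorted2_pairwise L hnd, ?_, ?_, ?_, ?_⟩
  · simp only []
    have hperm := PySem.List.sorted2_perm L (fun p : Int × Int => p.1)
      (fun p : Int × Int => p.2) false
    rw [← hL]
    exact hperm
  · exact PySem.List.pairwise_lt_pyRange_one 0 _
  · intro j hj
    rw [PySem.List.mem_pyRange_one] at hj
    simpa using hj
  · intro j hj
    rw [PySem.List.mem_pyRange_one] at hj
    have hj' : 0 ≤ j ∧ j < (caps.length : Int) := by simpa using hj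
    have hav : pvAvail caps (List.replicate caps.length []) j = PySem.List.pyGetD caps j 0 := by
      unfold pvAvail
      rw [pvGetD_replicate]
      simp
    rw [hav]
    cases hm : PySem.List.max? caps (fun x => x) with
    | none => exact absurd ((PySem.List.max?_eq_none_iff caps _).mp hm) hne
    | some m =>
      simp only [Option.getD_some]
      refine PySem.List.max?_isMax hm _ ?_
      rw [PySem.List.pyGetD_eq_getElem _ _ hj'.1 (by simpa using hj'.2)]
      exact List.getElem_mem _

-- the invariant propagates through the whole loop
theorem pvFold_rel (caps : List Int) (maxc : Int) :
    ∀ (els : List Int)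
      (sA : Bool × List (List Int) × List Int × List (List Int))
      (sB : Bool × List (List Int) × List (List Int) × List (Int × Int)),
    (∀ e ∈ els, 0 ≤ e) → pvRel caps maxc sA sB →
    pvRel caps maxc (els.foldl (pvAstep caps maxc) sA) (els.foldl pvBstep sB) := by
  intro els
  induction els with
  | nil => intro sA sB _ h; exact h
  | cons e els ih =>
    intro sA sB hels h
    simp only [List.foldl_cons]
    exact ih _ _ (fun x hx => hels x (List.mem_cons_of_mem _ hx))
      (pvStep_rel caps maxc e (hels e List.mem_cons_self) sA sB h)

-- ===== VERDICT =====
theorem bin_packing_best_fit_var_capa_spec : Claim_equal_bin_packing_best_fit_var_capa := by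
  intro caps els _ hpre
  unfold Spec_bin_packing_best_fit_var_capa
  unfold bin_packing_best_fit_var_capa bin_packing_best_fit_var_capa_alt
  have h := pvFold_rel caps ((PySem.List.max? caps (fun x => x)).getD 0) els _ _
    hpre.2 (pvInit_rel caps hpre.1)
  obtain ⟨h1, h2, h3, _⟩ := h
  simp only []
  rw [h1, h2, h3]
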